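/-
  start_decoder (CONTRACTS 113; 52 segments + the composition): THE ONE ASSERTION FAMILY `Vorbis.Spec.StartDecoder.At<segment>`
  that the statements of all its segments are made of, the part every cut point carries, and the function's `Spec`.

  WHO WRITES WHAT.   this file                          S4 (created first) — S5 builds on it; the last section is S5's to refine
                     Vorbis/Spec/StartDecoderA.lean     S4: `At2 … At9`, `AtC1 … AtC16` (entry → the end of the codebook section)
                     Vorbis/Spec/StartDecoderB.lean     S5: `AtF2 … AtF7`, `AtR1 … AtR19` (floors → the estimate, the tail)
                     HERE, because both halves use them: `At1` (the function's entry), `AtF1` (the hand-over C16 → F1 = SD.5),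
                     `AtERR` (the single epilogue 0x113b22, the exit of 45 segments), `AtRet` (after the `ret`)

  NAMING.  All 52 segments are single-entry, so there is ONE assertion per segment: `At<seg> u₀ g … v` is the ENTRY assertion of
  segment `start_decoder.<seg>`, and it IS the exit assertion of every segment that jumps there (same constant: the composition
  unit only chains). `pc_<seg>` is the segment's entry address (a label of Vorbis/Labels.lean). A segment's statement is

      ∀ (g : Ghost) (v : State), At<seg> u₀ g v → ReachVia Lay μ WayInv v (fun w => At<exit₁> u₀ g w ∨ At<exit₂> u₀ g w ∨ …)

  under the usual hypotheses (`Lay.hi = 1000000H`, `MicroOK μ`, `HasCodeNat Lay u₀ L.start_decoder.entry code_start_decoder.nat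
  L.start_decoder.size`, one contract per callee). Loop counters that the composition must see (the codebook loop's `i`) are extra
  arguments of the assertion (`AtC2 u₀ g i v`); everything else that varies (the ghost arena, ghost lengths) is existential INSIDE:
  `At<seg> u₀ g v := ∃ A …, Body<seg> u₀ g A … v`, `Body<seg>` a structure whose first field is `frame : Frame u₀ g pc_<seg> A v`.

  THE GHOSTS OF ONE ACTIVATION (`Ghost`): the input length `len`, the entry state `e` (so: `f = e.rdi`, the address RA = `e.rsp` of
  the return-address slot, the steady stack pointer `R = RA − 1480`), the return address `ret`, the ghost arena and the live
  non-stack objects at the entry `A0`, the active protected frames of the callers `frames`.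

  THE COMMON PART (`Frame u₀ g pc A v`, CONTRACTS "GLOBAL FRAME CONSTANTS of start_decoder": FR = FRM = FRAME):
      rip = pc ; rsp = R, R % 8 = 0 (from `AtEntry.align`) ; qword [R+8] = (R+50H)>>3 (read only by ERR) ;
      [R+598H, R+5C8H) = the caller's rbx rbp r12 r13 r14 r15, [R+5C8H] = the return address ;
      `ShadowInv A.2 ((R+50H, Frames.start_decoder) :: frames) R mem` — the frame POISONED, clean stack below rsp ;
      the image's text unchanged (`CodeOK u₀`), DF = 0 and the MXCSR masks (`abiInv`: every call needs them) ;
      the ghost arena `A.1` Extends the entry's (AR7) ; nothing was written outside the function's footprint since the entry.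
  The three compiler constants ONE20 / Z10 / Z24 are `SDFrameConsts k` (Vorbis/State.lean), a FIELD of `Real.SD len k …`:
      ONE20 dword [R+20H] = 1 from 0x113a9d on (so: from `At3` on; NOT at `At1`, `At2`) ; Z10 byte [R+10H] = 0 only for k ≤ 7 ;
      Z24 dword [R+24H] = 0 only for 2 ≤ k ≤ 11. `At2` therefore carries P3, not an `SD`.
  WHICH `SD k` AT WHICH ENTRY (k = the last finished section of INVARIANTS §5; `SD 0` = P3 + first_decode + ONE20 + Z10):
      At1 P3 (entry) · At2 P3 · At3 SD 0 · At4 … At7 SD 1 + the comment transient · At8 SD 2 without Z24 · At9 SD 2 · AtC1 SD 3 + ZF 0 ·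
      AtC2 i SD4 i · AtC3 … AtC15 `Cur i` (SD4 i with temp blocks) · AtC16 SD4 count · AtF1 SD 5 · (S5: F 5, R1 6 … R19 12)
  f is in rbp except: qword [R+18H] from 0x114293 to 0x1151bf (the codebook loop; rbp scratch) and r13 inside R5.

  BLOCK PREDICATE AND LIVE SET inside the function, for the ghost arena `A`:
      g.Blk A  = runBlk A.1 (objBlock f :: fixedBlocks len)          g.Live A = Live (stackObjs g.frames' ++ A.2)
  with `g.frames' = (R+50H, Frames.start_decoder) :: g.frames`: the own frame's objects (header, residue_cascade, p, low, hi) are live.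
-/
import Vorbis.Spec.Basic
import Vorbis.Spec.Common
import Vorbis.Spec.Leaves2
import Vorbis.Invariant
namespace Vorbis.Spec
open X86 X86.User Asan

namespace StartDecoder

/-! ### The entry addresses of the 52 segments -/

/-- entry of segment `start_decoder.1` (0x113980): the function's entry -/
abbrev pc_1 : Word := L.start_decoder.entry
/-- entry of segment `start_decoder.2` (0x113a2b) -/
abbrev pc_2 : Word := L.start_decoder.cut1
/-- entry of segment `start_decoder.3` (0x113c0c) -/
abbrev pc_3 : Word := L.start_decoder.cut14
/-- entry of segment `start_decoder.4` (0x113d3f) -/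
abbrev pc_4 : Word := L.start_decoder.cut25
/-- entry of segment `start_decoder.5` (0x113e77): head of loop 3676 -/
abbrev pc_5 : Word := L.start_decoder.cut42
/-- entry of segment `start_decoder.6` (0x113f28): head of loop 3682 -/
abbrev pc_6 : Word := L.start_decoder.cut50
/-- entry of segment `start_decoder.7` (0x11409e): head of loop 3695 -/
abbrev pc_7 : Word := L.start_decoder.cut60
/-- entry of segment `start_decoder.8` (0x114127) -/
abbrev pc_8 : Word := L.start_decoder.cut63
/-- entry of segment `start_decoder.9` (0x114184) -/
abbrev pc_9 : Word := L.start_decoder.cut69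
/-- entry of segment `start_decoder.ERR` (0x113b22): the single epilogue -/
abbrev pc_ERR : Word := L.start_decoder.cut4
/-- entry of segment `start_decoder.C1` (0x11428b) -/
abbrev pc_C1 : Word := L.start_decoder.cut80
/-- entry of segment `start_decoder.C2` (0x114298): head of the codebook loop 3746 -/
abbrev pc_C2 : Word := L.start_decoder.cut81
/-- entry of segment `start_decoder.C3` (0x1144ee) -/
abbrev pc_C3 : Word := L.start_decoder.cut101
/-- entry of segment `start_decoder.C4` (0x1147c3): head of loop 3786 -/
abbrev pc_C4 : Word := L.start_decoder.cut122
/-- entry of segment `start_decoder.C5` (0x114594) -/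
abbrev pc_C5 : Word := L.start_decoder.cut109
/-- entry of segment `start_decoder.C6` (0x114668) -/
abbrev pc_C6 : Word := L.start_decoder.cut113
/-- entry of segment `start_decoder.C7` (0x1146d2) -/
abbrev pc_C7 : Word := L.start_decoder.cut114
/-- entry of segment `start_decoder.C8` (0x1146f5) -/
abbrev pc_C8 : Word := L.start_decoder.cut116
/-- entry of segment `start_decoder.C9` (0x114724) -/
abbrev pc_C9 : Word := L.start_decoder.cut117
/-- entry of segment `start_decoder.C10` (0x114788) -/
abbrev pc_C10 : Word := L.start_decoder.cut120
/-- entry of segment `start_decoder.C11` (0x114bad) -/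
abbrev pc_C11 : Word := L.start_decoder.cut149
/-- entry of segment `start_decoder.C12` (0x114db9) -/
abbrev pc_C12 : Word := L.start_decoder.cut165
/-- entry of segment `start_decoder.C13` (0x115057): head of loop 3910 -/
abbrev pc_C13 : Word := L.start_decoder.cut175
/-- entry of segment `start_decoder.C14` (0x1150b9) -/
abbrev pc_C14 : Word := L.start_decoder.cut176
/-- entry of segment `start_decoder.C15` (0x114dfa) -/
abbrev pc_C15 : Word := L.start_decoder.cut166
/-- entry of segment `start_decoder.C16` (0x1151bf) -/
abbrev pc_C16 : Word := L.start_decoder.cut181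
/-- entry of segment `start_decoder.F1` (0x11520c): the hand-over S4 → S5 -/
abbrev pc_F1 : Word := L.start_decoder.cut186
/-- entry of segment `start_decoder.F2` (0x11526a) -/
abbrev pc_F2 : Word := L.start_decoder.cut189
/-- entry of segment `start_decoder.F3` (0x11532b) -/
abbrev pc_F3 : Word := L.start_decoder.cut194
/-- entry of segment `start_decoder.F4` (0x115494) -/
abbrev pc_F4 : Word := L.start_decoder.cut206
/-- entry of segment `start_decoder.F5` (0x1155c7) -/
abbrev pc_F5 : Word := L.start_decoder.cut215
/-- entry of segment `start_decoder.F6` (0x115714) -/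
abbrev pc_F6 : Word := L.start_decoder.cut221
/-- entry of segment `start_decoder.F7` (0x115842) -/
abbrev pc_F7 : Word := L.start_decoder.cut227
/-- entry of segment `start_decoder.R1` (0x1158f8) -/
abbrev pc_R1 : Word := L.start_decoder.cut230
/-- entry of segment `start_decoder.R2` (0x115982) -/
abbrev pc_R2 : Word := L.start_decoder.cut235
/-- entry of segment `start_decoder.R3` (0x1159f8) -/
abbrev pc_R3 : Word := L.start_decoder.cut239
/-- entry of segment `start_decoder.R4` (0x115bdc) -/
abbrev pc_R4 : Word := L.start_decoder.cut255
/-- entry of segment `start_decoder.R5` (0x115cef) -/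
abbrev pc_R5 : Word := L.start_decoder.cut260
/-- entry of segment `start_decoder.R6` (0x115cf9) -/
abbrev pc_R6 : Word := L.start_decoder.cut261
/-- entry of segment `start_decoder.R7` (0x115db9) -/
abbrev pc_R7 : Word := L.start_decoder.cut265
/-- entry of segment `start_decoder.R8` (0x115f22) -/
abbrev pc_R8 : Word := L.start_decoder.cut270
/-- entry of segment `start_decoder.R9` (0x116105) -/
abbrev pc_R9 : Word := L.start_decoder.cut279
/-- entry of segment `start_decoder.R10` (0x116380) -/
abbrev pc_R10 : Word := L.start_decoder.cut300
/-- entry of segment `start_decoder.R11` (0x11635d) -/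
abbrev pc_R11 : Word := L.start_decoder.cut297
/-- entry of segment `start_decoder.R12` (0x116545) -/
abbrev pc_R12 : Word := L.start_decoder.cut310
/-- entry of segment `start_decoder.R13` (0x115f67) -/
abbrev pc_R13 : Word := L.start_decoder.cut272
/-- entry of segment `start_decoder.R14` (0x11655f) -/
abbrev pc_R14 : Word := L.start_decoder.cut311
/-- entry of segment `start_decoder.R15` (0x115f97) -/
abbrev pc_R15 : Word := L.start_decoder.cut274
/-- entry of segment `start_decoder.R16` (0x11665c) -/
abbrev pc_R16 : Word := L.start_decoder.cut319
/-- entry of segment `start_decoder.R17` (0x116059) -/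
abbrev pc_R17 : Word := L.start_decoder.cut277
/-- entry of segment `start_decoder.R18` (0x116784) -/
abbrev pc_R18 : Word := L.start_decoder.cut325
/-- entry of segment `start_decoder.R19` (0x11682e) -/
abbrev pc_R19 : Word := L.start_decoder.cut326

/-! ### The numbers of the frame (CONTRACTS 113, `registers`; c/FRAMES.txt; c/STACK_f.txt) -/

/-- The stack bytes start_decoder uses below its return address, callees included (CONTRACTS: "worst-case depth 1888"). -/
abbrev depth : Nat := 1888

/-- The steady stack pointer lies `1480` bytes below the return-address slot: six pushes and `sub rsp, 598H`. -/
abbrev steady : Nat := 1480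

/-- **The block predicate while the decoder object is `&p` on the stack** (Vorbis/Invariant/Blk.lean, "WHICH `Blk` WHEN"): the setup
blocks of the ghost arena `A.1`, the object `*f`, the fixed objects (input, output, globals). -/
def blk (len f : Nat) (A : Arena × List Obj) : Block → Prop := runBlk A.1 (objBlock f :: fixedBlocks len)

/-! ### The ghosts of one activation -/

/-- **The ghost parameters of one activation of start_decoder**, the same at all of its cut points. -/
structure Ghost where
  /-- the length of the input (S1) -/
  len : Nat
  /-- the ghost arena and the live non-stack objects (globals, input, output, arena blocks) at the entry -/
  A0 : Arena × List Obj
  /-- the active protected frames of the callers at the entry, innermost first (stb_vorbis_open_memory's, decode_all's) -/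
  frames : List (Nat × FrameLayout)
  /-- the state at the function's first instruction -/
  e : State
  /-- the return address -/
  ret : Word

namespace Ghost

/-- `f = &p`, the decoder object: the argument register at the entry. -/
def f (g : Ghost) : Nat := (g.e.reg .rdi).toNat

/-- RA: the address of the return-address slot = the stack pointer at the entry. -/
def RA (g : Ghost) : Nat := (g.e.reg .rsp).toNat

/-- `R`: the steady stack pointer (`rsp` at every cut point but the entry and the return) = RA − 1480. -/
def R (g : Ghost) : Nat := g.RA - steady

/-- The base of the protected frame: `[R + 50H]` = RA − 1400. -/
def base (g : Ghost) : Nat := g.R + 0x50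

/-- The active protected frames inside the function: its own, poisoned, in front of the callers'. -/
def frames' (g : Ghost) : List (Nat × FrameLayout) := (g.base, Vorbis.Frames.start_decoder) :: g.frames

/-- The objects besides the arena's setup blocks that the invariant's SHAPE clauses may name: `*f` (a stack object of
stb_vorbis_open_memory) and the fixed objects (input, output, globals). -/
def extra (g : Ghost) : List Block := objBlock g.f :: fixedBlocks g.len

/-- **The block predicate inside start_decoder** for the ghost arena `A` (Vorbis/Invariant/Blk.lean, "WHICH `Blk` WHEN"). -/
def Blk (g : Ghost) (A : Arena × List Obj) : Block → Prop := blk g.len g.f A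

/-- **The live set inside start_decoder** for the live non-stack objects `A.2`: with the own frame's objects. -/
def Live (g : Ghost) (A : Arena × List Obj) : Nat → Prop := Asan.Live (stackObjs g.frames' ++ A.2)

/-- The live set at the entry and after the return: without the own frame. -/
def Live0 (g : Ghost) (A : Arena × List Obj) : Nat → Prop := Asan.Live (stackObjs g.frames ++ A.2)

/-- The frame objects of start_decoder, by name: `header` (6 bytes at `[R + A0H]`). -/
def header (g : Ghost) : Nat := g.R + 0xa0

end Ghost

/-! ### The function's footprint -/

/-- **What start_decoder may write besides its own stack** (CONTRACTS 113 `footprint`, coarsened to whole objects): the decoder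
object `*f`; the global `crc_table` (crc32_init); the arena `[B, B + L)` (the blocks it allocates) and the arena's shadow
(arena_unpoison / arena_poison); the shadow of its own protected frame (prologue / epilogue). -/
def writes (A0 : Arena × List Obj) (u : State) : List Span :=
  [(objBlock (u.reg .rdi).toNat).span,
   ⟨0x121c00, 0x121c00 + 1024⟩,
   ⟨A0.1.B, A0.1.B + A0.1.L⟩,
   shadowSpan A0.1.B (A0.1.B + A0.1.L),
   shadowSpan ((u.reg .rsp).toNat - 1400) ((u.reg .rsp).toNat - 1400 + Vorbis.Frames.start_decoder.size)]

/-- The footprint of the activation: the stack bytes `[RA − 1888, RA)` and `writes`. -/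
def footprint (g : Ghost) : List Span :=
  ⟨g.RA - depth, g.RA⟩ :: writes g.A0 g.e

/-! ### The common part of every cut point -/

/-- **FR (= FRM = FRAME) of CONTRACTS 113, and what the machine-level walk and the final `Returned` need at every cut point**, for the
current ghost arena / object list `A` and the program counter `pc`. `u₀` = the reference state of the statement (the image's text). -/
structure Frame (u₀ : State) (g : Ghost) (pc : Word) (A : Arena × List Obj) (v : State) : Prop where
  /-- the function was CALLED at `g.e`: return address `g.ret` at `[RA]` (and `< 40000000H`), RA ≡ 8 (mod 16), 1888 bytes of room -/
  entry : AtEntry (conv u₀) L.start_decoder.entry depth g.ret g.e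
  rip : v.rip = pc
  /-- rsp = the steady stack pointer -/
  rsp : v.reg .rsp = addr g.R
  /-- qword `[R + 8]` = the shadow index of the protected frame (written 0x1139b8, read only by ERR) -/
  shadowIdx : v.mem.u64 (g.R + 8) = (g.R + 0x50) / 8
  /-- the caller's callee-saved registers, where the six pushes put them -/
  saved_rbx : v.mem.u64 (g.R + 0x598) = (g.e.reg .rbx).toNat
  saved_rbp : v.mem.u64 (g.R + 0x5a0) = (g.e.reg .rbp).toNat
  saved_r12 : v.mem.u64 (g.R + 0x5a8) = (g.e.reg .r12).toNat
  saved_r13 : v.mem.u64 (g.R + 0x5b0) = (g.e.reg .r13).toNat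
  saved_r14 : v.mem.u64 (g.R + 0x5b8) = (g.e.reg .r14).toNat
  saved_r15 : v.mem.u64 (g.R + 0x5c0) = (g.e.reg .r15).toNat
  /-- the return address is still in its slot `[R + 5C8H]` = `[RA]` -/
  saved_ra : v.mem.u64 (g.R + 0x5c8) = g.ret.toNat
  /-- the image's text is unchanged -/
  code : CodeOK u₀ v.mem
  /-- DF = 0, the SSE exception masks set -/
  inv : abiInv v
  /-- SH1 – SH8 with the own protected frame POISONED (innermost), the stack below rsp clean -/
  shadow : ShadowInv A.2 g.frames' g.R v.mem
  /-- no live non-stack object lies in the image's text (so a checked store never hits the code) -/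
  offText : ∀ o, o ∈ A.2 → L.textHi ≤ o.base
  /-- AR7: the ghost arena extends the entry's -/
  ext : g.A0.1.Extends A.1
  /-- S5: the callers' protected frames lie above the return-address slot (from `ShadowPre` at the entry: `StackOK.active`; the
  premise `hfr` of `ShadowInv.epilogue_ra`). Memory-independent: carried unchanged. -/
  callers : ∀ bF, bF ∈ g.frames → g.RA + 8 ≤ bF.1
  /-- S5: SH7 for the global `log2_4` (Vorbis/Spec/Leaves2.lean): the table has its contents — the VALUE of `ilog` (≤ 4 for an argument
  ≤ 15: the bit count of the next `get_bits`; `ld` of compute_bitreverse) rests on it. The function writes no global but `crc_table`. -/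
  sh7 : Log2_4In v.mem
  /-- nothing outside the function's footprint was written since the entry -/
  same : Mem.SameExcept (footprint g) g.e.mem v.mem

namespace Frame
variable {u₀ : State} {g : Ghost} {pc : Word} {A : Arena × List Obj} {v : State}

/-- RA is a multiple of 8 (`AtEntry.align`: gcc's `-fipa-stack-alignment` gives no more), and the function's stack lies in
`[700000H, 800000H)`. -/
theorem ra (h : Frame u₀ g pc A v) : g.RA % 8 = 0 ∧ 0x700000 + depth ≤ g.RA ∧ g.RA + 8 ≤ 0x800000 :=
  ⟨h.entry.align, h.entry.room, h.entry.top⟩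

/-- The steady stack pointer as arithmetic: `R + 1480 = RA`, `R % 8 = 0`. -/
theorem r_eq (h : Frame u₀ g pc A v) : g.R + steady = g.RA ∧ g.R % 8 = 0 := by
  obtain ⟨h1, h2, _⟩ := h.ra
  unfold Ghost.R
  simp only [depth, steady] at h2 ⊢
  omega

end Frame

/-! ### S5: WHICH ARENA BLOCK IS WHOSE — the record from which `Separated` and "every owned block is an arena block" follow

`Real.SD` states every SHAPE clause over `g.Blk A` = `runBlk A.1 (objBlock f :: fixedBlocks len)`: from `g.Blk A ⟨ptr, n⟩` nobody can
tell later that the block is an ARENA block (it could be `objBlock f` or a fixed object), nor WHEN it was allocated. Both are known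
at the allocating call only (setup_malloc's post: the new block is `(A.pushSetup n).Blk ⟨B + S + 32, n⟩`, and it is no block of
`A`). THE RECORD: every cut point carries the block-carrying groups finished so far over THE ARENA'S OWN PREDICATE (`Own k Ac.Blk`);
the `g.Blk A` instance that `Real.SD` asks for FOLLOWS from it (`X.reblk` with `runBlk_setup`), so a segment carries ONE copy (every
owner's `transfer / frame / reblk / step` lemma is generic in the block predicate). From SD.9 on the record is split by the TIME of
allocation, with two ghost snapshots of the arena: `A9` (at the start of the channel loop), `A10` (after it): the configuration's
blocks are blocks of `A9`; the sample buffers are blocks of `A10` that are no blocks of `A9` (`Since A9 A10`); the MDCT tables are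
blocks of the final arena that are no blocks of `A10`. Hence: a block the configuration READS is never a sample buffer, and none of
them is the stack object `*f` — `Separated` (Vorbis/Invariant/Stores.lean) and the premises `hne1`, `hne2` of `Separated.transfer`. -/

/-! `Since A' A` (the blocks allocated after the snapshot `A'`: blocks of the arena `A` that are no blocks of `A'`), `Since.mono`,
`Since.blk`, `Since.ne_old` … and `arena_disjoint`, `arena_inside` are VOCABULARY OF THE ARENA LAYER: Vorbis/Arena.lean §9. -/

/-- **The block-carrying groups of `SD k`, `k ≤ 9`, over the block predicate `Ab`** (in the assertions: `Ac.Blk`, the setup blocks of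
a ghost arena): CM1 – CM3 from SD.2, CB0 (non-NULL) from SD.3, every codebook from SD.5, FL1 – FL10 from SD.6, R1 – R8b from SD.7,
MP1 – MP6 from SD.8. (HD, MD have no block; M6 / FY1 / M3 are in `OwnAll`.) -/
structure Own (k : Nat) (Ab : Block → Prop) (mem : Mem) (f : Nat) : Prop where
  /-- CM1 – CM3: vendor, the comment table, every comment -/
  comment : 2 ≤ k → CommentsOK Ab mem f
  /-- CB0: the codebooks block -/
  cb0 : 3 ≤ k → CB0 Ab mem f
  /-- `codebooks ≠ NULL` -/
  nonnull : 3 ≤ k → stb_vorbis.codebooks mem f ≠ 0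
  /-- K1 – K6 of every codebook: its five tables -/
  books : 5 ≤ k → ∀ i : Nat, (i : Int) < stb_vorbis.codebook_count mem f →
    CodebookOK Ab mem (stb_vorbis.codebooks_at mem f i)
  /-- FL1 – FL10: the floor block -/
  floor : 6 ≤ k → FloorsOK Ab mem f
  /-- R1 – R8b: `residue_config`, every `residue_books`, `classdata`, row -/
  residue : 7 ≤ k → ResidueOK Ab mem f
  /-- MP1 – MP6: the mapping table, every `chan` -/
  mapping : 8 ≤ k → MappingOK Ab mem f

/-- The record at an earlier point. -/
theorem Own.weaken {k k' : Nat} {Ab : Block → Prop} {mem : Mem} {f : Nat} (h : Own k Ab mem f) (hk : k' ≤ k) : Own k' Ab mem f :=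
  ⟨fun h2 => h.comment (by omega), fun h3 => h.cb0 (by omega), fun h3 => h.nonnull (by omega), fun h5 => h.books (by omega),
    fun h6 => h.floor (by omega), fun h7 => h.residue (by omega), fun h8 => h.mapping (by omega)⟩

/-- **The complete record (SD.11, SD.12)**, for the final arena `A` and the two snapshots: the configuration's blocks are blocks of
`A9`, the sample buffers (M6, FY1) were allocated between `A9` and `A10`, the MDCT tables (M3) after `A10`. -/
structure OwnAll (A9 A10 A : Arena) (mem : Mem) (f : Nat) : Prop where
  ext9 : A9.Extends A10
  ext10 : A10.Extends A
  /-- CM, CB0, the codebooks, FL, R, MP over the blocks of `A9` -/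
  cfg : Own 9 A9.Blk mem f
  /-- M6: `channel_buffers[c]`, `previous_window[c]` -/
  m6 : Mdct.M6OK (Since A9 A10) mem f
  /-- FY1: `finalY[c]` -/
  fy : FY1 (Since A9 A10) mem f
  /-- M2 – M4: the ten tables of the two `init_blocksize` -/
  mdct : Mdct.MdctOK (Since A10 A) mem f

/-- **What the hand-over points and every callee's precondition need besides the invariant** — nothing of it depends on the memory:
THE HAND-OVER CARRIER `Hand A.2 frames len A.1 f` of Vorbis/Spec/Common.lean (`*f`, the input, the output each inside ONE live
object — `*f` is the stack object `p` of stb_vorbis_open_memory: an object of the CALLERS' frames —; the six registered globals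
live objects: `log2_4` for ilog, `crc_table` for crc32_init, `vorbis` for vorbis_validate; the arena above the image's text: the
allocators' `ArenaPre.offText`; the fixed objects outside the arena's buffer: S4's `outside`, the `hout` of `ArenaOK.runBlk_ok`),
and WHERE `*f` IS at start_decoder time: outside the arena. The fields of `Hand` are fields of `HandOK` (`h.obj`, `h.inp`, `h.out`,
`h.globals`, `h.arenaText`, `h.outside`); its projections apply through `h.toHand` (`h.toHand.readerEnv`, `.g_log2` …). -/
structure HandOK (len f : Nat) (frames : List (Nat × FrameLayout)) (A : Arena × List Obj) : Prop
    extends Hand A.2 frames len A.1 f where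
  /-- `*f` lies outside the arena's buffer `[B, B + L)` (it is a stack object; `B`, `L` never change: `Arena.Extends`): with it an
  arena block is never `objBlock f` — `Separated.obj` / `.bufobj` at SD.12 (`Done.separated`) -/
  objOut : f + Off.sizeof.stb_vorbis ≤ A.1.B ∨ A.1.B + A.1.L ≤ f

/-- **`HandOK` after an allocation** (the ghost arena grew, the object list got longer): nothing of it is lost. `B` and `L` never
change (`Arena.Extends`). -/
theorem HandOK.mono {len f : Nat} {frames : List (Nat × FrameLayout)} {A A' : Arena × List Obj} (h : HandOK len f frames A)
    (hext : A.1.Extends A'.1) (hsub : ∀ o, o ∈ A.2 → o ∈ A'.2) : HandOK len f frames A' := by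
  refine ⟨h.toHand.mono hext hsub (fun _ ho => ho), ?_⟩
  rw [hext.B, hext.L]
  exact h.objOut

/-- **The laws of the block predicate inside start_decoder** (`blk len f A` = the arena's setup blocks, `*f`, the fixed objects):
`ArenaOK.runBlk_ok`, whose `hout` is `HandOK.outside` for the fixed objects and `HandOK.objOut` for `*f`. `hstack`: `*f` is a stack
object (of stb_vorbis_open_memory's frame). -/
theorem HandOK.blk_ok {len f : Nat} {frames : List (Nat × FrameLayout)} {A : Arena × List Obj} {mem : Mem} {p : Nat}
    (h : HandOK len f frames A) (hA : ArenaOK A.1 A.2 mem p) (hlen : len ≤ 0x1FF000)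
    (hstack : 0x700000 ≤ f ∧ f + Off.sizeof.stb_vorbis ≤ 0x800000) : BlkOK (blk len f A) := by
  apply hA.runBlk_ok
  · exact blkOK_cons_stack (fixed_ok len hlen) hstack (fixed_off_stack len hlen)
  · intro C hC
    rcases List.mem_cons.mp hC with rfl | hm
    · exact h.objOut
    · exact h.outside C hm

/-- `HandOK` for the ghosts of an activation (over the CALLERS' frames: it holds at the entry, inside, and after the return). -/
def Ghost.Hand (g : Ghost) (A : Arena × List Obj) : Prop := HandOK g.len g.f g.frames A

/-! ### The function's contract, and the four assertions both halves use -/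

/-- **The failure state of start_decoder (SD.ERR)** at the epilogue with eax = 0, for the ghost `A`: DeinitOK(&p), `Bits f`, the
environment of a check site — and of the arena layer only `ArenaErr` (AR1 + "every setup block is a live object": temp blocks may be
left allocated, T may point into one). -/
structure Failed (len f : Nat) (Live : Nat → Prop) (A : Arena × List Obj) (mem : Mem) : Prop where
  err : Real.SDERR len (blk len f A) Live mem f
  arena : ArenaErr A.1 A.2

/-- **The success state of start_decoder (SD.12)**, for the ghost `A`: full `VorbisOK(&p)`, ArenaOK with `temps = []`, the final
test (`S + 1808 + tmr + 64 ≤ T = L`), `first_decode = 1`. What `Real.P5.of_move` starts from. -/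
structure Done (len f : Nat) (Live : Nat → Prop) (A : Arena × List Obj) (mem : Mem) : Prop where
  env : Env (blk len f A) Live mem
  vorbis : Real.VorbisOK len (blk len f A) mem f
  arena : ArenaOK A.1 A.2 mem f
  noTemps : A.1.temps = []
  final : FinalTest mem f
  first : stb_vorbis.first_decode mem f = 1
  /-- S5: which arena block is whose, and when it was allocated (⇒ `Separated`: `Done.separated`, Vorbis/Spec/StartDecoderB.lean) -/
  own : ∃ A9 A10 : Arena, OwnAll A9 A10 A.1 mem f

end StartDecoder

/-- **`start_decoder(rdi = f)`** (CONTRACTS 113). Pre: the shadow layer with the callers' frames active; point P3 (OB1, H0 up to the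
stream fields, the arena fresh, `Bits f` with `stream = stream_start`); `HandOK` (S5: `*f`, the input, the output each inside ONE live
object, the six globals live objects, the arena above the text — the forms the callees' preconditions ask for; none follows from P3,
whose `BlkLive` is bytewise); SH7 for `log2_4` (the value of `ilog`). Post: eax ∈ {0, 1}; the shadow layer with the own frame
popped, for a ghost arena that extends the entry's (AR7); `HandOK` for THAT arena and object list, on both exits (S9:
stb_vorbis_open_memory needs `*f`, the input, the output, the globals as objects of `A.2` for vorbis_deinit / vorbis_alloc / memcpy;
the epilogue has it as `BodyERR.hand`); eax = 1: SD.12 (`StartDecoder.Done`); eax = 0: SD.ERR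
(`StartDecoder.Failed`: DeinitOK, `Bits f`, ArenaErr — NOT ArenaOK). Ghosts: the input's length, the arena ghost with the live
non-stack objects, the callers' protected frames. -/
def start_decoder.spec (len : Nat) (A0 : Arena × List Obj) (frames : List (Nat × FrameLayout)) : Spec where
  pre u :=
    ShadowPre A0.2 frames u ∧
    Real.P3 len A0 (StartDecoder.blk len (u.reg .rdi).toNat A0) (Asan.Live (stackObjs frames ++ A0.2))
      u.mem (u.reg .rdi).toNat ∧
    StartDecoder.HandOK len (u.reg .rdi).toNat frames A0 ∧
    Log2_4In u.mem
  post u v :=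
    ∃ A : Arena × List Obj,
      A0.1.Extends A.1 ∧
      ShadowInv A.2 frames (v.reg .rsp).toNat v.mem ∧
      (∀ o, o ∈ A.2 → L.textHi ≤ o.base) ∧
      StartDecoder.HandOK len (u.reg .rdi).toNat frames A ∧
      (((v.reg .rax).toNat % 2 ^ 32 = 1 ∧
          StartDecoder.Done len (u.reg .rdi).toNat (Asan.Live (stackObjs frames ++ A.2)) A v.mem) ∨
       ((v.reg .rax).toNat % 2 ^ 32 = 0 ∧
          StartDecoder.Failed len (u.reg .rdi).toNat (Asan.Live (stackObjs frames ++ A.2)) A v.mem))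
  frame := StartDecoder.depth
  writes u := StartDecoder.writes A0 u

@[vspec] theorem start_decoder.spec_frame (len : Nat) (A0 : Arena × List Obj) (frames : List (Nat × FrameLayout)) :
    (start_decoder.spec len A0 frames).frame = 1888 := id rfl

@[vspec] theorem start_decoder.spec_writes (len : Nat) (A0 : Arena × List Obj) (frames : List (Nat × FrameLayout)) (u : State) :
    (start_decoder.spec len A0 frames).writes u = StartDecoder.writes A0 u := id rfl

namespace StartDecoder

/-- The contract's `Spec` for the ghosts of an activation (an abbreviation: the `vspec` rules `start_decoder.spec_frame` /
`_writes` must see through it — `v_returned` evaluates `(spec g).footprint g.e` with `simp only [Spec.footprint, vspec]`). -/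
abbrev spec (g : Ghost) : Spec := start_decoder.spec g.len g.A0 g.frames

/-- **`At1`: the entry of the function** (entry of segment `start_decoder.1`, 0x113980): `v` IS the entry state, it was called
(`AtEntry`), and the contract's precondition holds. The composition unit starts here with `g = ⟨len, A0, frames, u, ret⟩`. -/
structure At1 (u₀ : State) (g : Ghost) (v : State) : Prop where
  here : v = g.e
  entry : AtEntry (conv u₀) L.start_decoder.entry depth g.ret v
  pre : (spec g).pre v

/-- **`AtF1`: the hand-over S4 → S5** (exit of C16, entry of F1, 0x11520c = SD.5): FRAME with rbp = f; `Real.SD len 5`: OB1, HD1 – HD3,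
CM1 – CM3, CB0 (non-NULL), CodebookOK of EVERY codebook, everything from `floor_count` on still H0 (`rest`), `Bits f`, ArenaOK with
`temps = []`, ONE20 / Z10 / Z24 (`frame`), `first_decode = 1`. Dead: rbx r12 – r15, `[R+18H]` (still = f, reused as the floor loop's
`i`), `[R+28H] [R+30H] [R+38H]`. -/
structure BodyF1 (u₀ : State) (g : Ghost) (A : Arena × List Obj) (v : State) : Prop where
  frame : Frame u₀ g pc_F1 A v
  /-- rbp = f -/
  rbp : v.reg .rbp = addr g.f
  sd : Real.SD g.len 5 A (g.Blk A) (g.Live A) v.mem g.f g.R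
  /-- S5: `*f`, the input, the globals as live objects; the arena above the text (the callees' preconditions) -/
  hand : g.Hand A
  /-- S5: the comment blocks, the codebooks block and every codebook's tables are blocks of the ARENA -/
  own : Own 5 A.1.Blk v.mem g.f

/-- `AtF1`: `BodyF1` for some ghost arena `A` (which extends the entry's: `Frame.ext`). -/
def AtF1 (u₀ : State) (g : Ghost) (v : State) : Prop := ∃ A, BodyF1 u₀ g A v

/-- **`AtERR`: the single epilogue 0x113b22** (entry of segment `start_decoder.ERR`; the exit of every segment that can
`return error(…)` / `return FALSE`, and of R19's `return TRUE`): FR WITHOUT "rbp = f" (rbx rbp r12 – r15 arbitrary), eax = the return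
value. eax = 0: SD.ERR (`Failed`); eax = 1 (only from R19, `mov eax, [rsp+20H]`): SD.12 (`Done`). -/
structure BodyERR (u₀ : State) (g : Ghost) (A : Arena × List Obj) (v : State) : Prop where
  frame : Frame u₀ g pc_ERR A v
  /-- S5: `*f`, the input, the output, the globals as live objects of the CALLERS' frames / `A.2`: with `ArenaErr` / `ArenaOK` it gives
  `BlkLive (g.Blk A) (g.Live0 A)` — `Done` / `Failed` over the live set WITHOUT the own frame, which the postcondition states -/
  hand : g.Hand A
  result :
    ((v.reg .rax).toNat % 2 ^ 32 = 0 ∧ Failed g.len g.f (g.Live A) A v.mem) ∨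
    ((v.reg .rax).toNat % 2 ^ 32 = 1 ∧ Done g.len g.f (g.Live A) A v.mem)

/-- `AtERR`: `BodyERR` for some ghost arena `A`. -/
def AtERR (u₀ : State) (g : Ghost) (v : State) : Prop := ∃ A, BodyERR u₀ g A v

/-- **`AtRet`: after the `ret`** (the exit of segment `start_decoder.ERR`): the function has returned, `Returned` of its contract. -/
def AtRet (u₀ : State) (g : Ghost) (v : State) : Prop :=
  Returned (conv u₀) (spec g) g.e g.ret v

/-- **An error exit from a cut point where `Real.SD len k` holds**: SD.ERR follows (`Real.SD.err`); ArenaOK gives ArenaErr. How a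
segment's worker closes an `AtERR` exit after `call error` (which writes `f->error` only: the `SD` is carried by its frame lemmas). -/
theorem Failed.of_sd {g : Ghost} {A : Arena × List Obj} {mem : Mem} {k : Nat}
    (h : Real.SD g.len k A (g.Blk A) (g.Live A) mem g.f g.R) : Failed g.len g.f (g.Live A) A mem := by
  refine ⟨Real.SD.err h, ?_⟩
  have ha : ArenaOK A.1 A.2 mem g.f := h.arena
  refine ⟨ha.AR1, ?_⟩
  intro o ho
  apply ha.AR6 o
  unfold Arena.objs
  exact List.mem_append_left _ ho

/-! ### S5: what follows from the record at SD.12 — `Separated`, "every owned block is an arena block" (pure logic) -/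

/-- The three block predicates of the complete record all lie below the run's predicate. -/
theorem OwnAll.up9 {A9 A10 A : Arena} {mem : Mem} {f : Nat} (h : OwnAll A9 A10 A mem f) (B : Block) (hB : A9.Blk B) : A.Blk B :=
  (hB.mono h.ext9).mono h.ext10

/-- A sample buffer's block is a block of the final arena. -/
theorem OwnAll.up10 {A9 A10 A : Arena} {mem : Mem} {f : Nat} (h : OwnAll A9 A10 A mem f) (B : Block) (hB : Since A9 A10 B) :
    A.Blk B :=
  hB.1.mono h.ext10

/-- **The CONFIG part of `VorbisOK` over any predicate above the final arena's** (`Blk := g.Blk A`: what `Done.vorbis` asks;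
`Blk := A.Blk`: "every owned block is an arena block"), from the complete record, HD, MD and T1. -/
theorem OwnAll.config {A9 A10 A : Arena} {mem : Mem} {f : Nat} (h : OwnAll A9 A10 A mem f) {Blk : Block → Prop}
    (hup : ∀ B, A.Blk B → Blk B) (hh : HeaderOK mem f) (hm : ModeOK mem f) (ht : T1 mem f) : ConfigOK Blk mem f :=
  { header := hh
    comment := (h.cfg.comment (by omega)).reblk (fun B _ hB => hup B (h.up9 B hB))
    cb0 := ((h.cfg.cb0 (by omega)).reblk (fun B _ hB => hup B (h.up9 B hB))).ok (h.cfg.nonnull (by omega))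
    nonnull := h.cfg.nonnull (by omega)
    books := fun i hi => (h.cfg.books (by omega) i hi).reblk (fun B _ hB => hup B (h.up9 B hB))
    floor := (h.cfg.floor (by omega)).reblk (fun B _ hB => hup B (h.up9 B hB))
    finalY := h.fy.reblk (fun B _ hB => hup B (h.up10 B hB))
    residue := (h.cfg.residue (by omega)).reblk (fun B _ hB => hup B (h.up9 B hB))
    mapping := (h.cfg.mapping (by omega)).reblk (fun B _ hB => hup B (h.up9 B hB))
    mode := hm
    m6 := h.m6.reblk (fun B _ hB => hup B (h.up10 B hB))
    mdct := h.mdct.reblk (fun B _ hB => hup B hB.1)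
    temp := ht }

/-- **Every block the configuration READS is a block of the snapshot `A9`, or a block allocated after the snapshot `A10`** (the two
bit-reverse tables): never one allocated between them. -/
theorem OwnAll.reads {A9 A10 A : Arena} {mem : Mem} {f : Nat} (h : OwnAll A9 A10 A mem f) {B : Block}
    (hR : ConfigOK.Reads mem f B) : A9.Blk B ∨ Since A10 A B := by
  cases hR with
  | comment hc => exact Or.inl ((h.cfg.comment (by omega)).reads_blk hc)
  | codebooks => exact Or.inl ((h.cfg.cb0 (by omega)).ok (h.cfg.nonnull (by omega))).F2
  | sorted_values i hi hse => exact Or.inl ((h.cfg.books (by omega) i hi).K4.sv hse)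
  | lengths i hi => exact Or.inl (h.cfg.books (by omega) i hi).lengths_block
  | floor => exact Or.inl (h.cfg.floor (by omega)).FL2
  | residue ho => exact Or.inl ((h.cfg.residue (by omega)).owns_blk ho)
  | mapping ho => exact Or.inl ((h.cfg.mapping (by omega)).owns_blk ho)
  | mdct hr => exact Or.inr (h.mdct.reads_blk hr)

/-- **Every block the configuration reads is a block of the ARENA.** -/
theorem OwnAll.reads_arena {A9 A10 A : Arena} {mem : Mem} {f : Nat} (h : OwnAll A9 A10 A mem f) {B : Block}
    (hR : ConfigOK.Reads mem f B) : A.Blk B := by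
  cases h.reads hR with
  | inl h9 => exact h.up9 B h9
  | inr hs => exact hs.1

/-- **A sample buffer is a block allocated between the two snapshots** — up to the degenerate case of `SampleBuf.finalY` with an
allocated block of size 0 at the address of the `finalY[c]` block (it meets nothing). -/
theorem OwnAll.buf {len f : Nat} {A9 A10 : Arena} {A : Arena × List Obj} {mem : Mem} (h : OwnAll A9 A10 A.1 mem f)
    (hok : BlkOK (blk len f A)) {C : Block} (hC : SampleBuf (blk len f A) mem f C) :
    ∃ C' : Block, Since A9 A10 C' ∧ C'.base = C.base ∧ (C = C' ∨ C.size = 0) := by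
  cases hC with
  | chan c hc => exact ⟨_, (h.m6 c hc).1, rfl, Or.inl rfl⟩
  | prev c hc => exact ⟨_, (h.m6 c hc).2, rfl, Or.inl rfl⟩
  | finalY c hc sz hb =>
    obtain ⟨sz', hs', hsz⟩ := h.fy c hc
    refine ⟨⟨stb_vorbis.finalY mem f c, sz'⟩, hs', rfl, ?_⟩
    have hfl := h.cfg.floor (by omega)
    have h1 := hfl.FL1
    have hv := (hfl.floors 0 (by omega)).values_bounds
    have h0 := hsz 0 (by omega)
    have hpos : 0 < sz' := by omega
    have hb' : blk len f A ⟨stb_vorbis.finalY mem f c, sz'⟩ := runBlk_setup (h.up10 _ hs')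
    cases hok.apart _ _ hb hb' with
    | inl e => exact Or.inl e
    | inr hd =>
      right
      simp only [vblock] at hd
      simp only []
      omega

/-- **SEP (`Separated`, Vorbis/Invariant/Stores.lean) AT SD.12, FROM THE RECORD**: the blocks the configuration reads were allocated
before the snapshot `A9` or after `A10`, the sample buffers between the two, all of them are blocks of the arena, and `*f` (a stack
object of stb_vorbis_open_memory) lies outside the arena's buffer (`hout`: the fact that makes `BlkOK (g.Blk A)`; the caller has
it from `vorbis_init`'s pre). U's open item. -/
theorem Done.separated {len f : Nat} {Live : Nat → Prop} {A : Arena × List Obj} {mem : Mem} (h : Done len f Live A mem)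
    (hout : f + Off.sizeof.stb_vorbis ≤ A.1.B ∨ A.1.B + A.1.L ≤ f) : Separated (blk len f A) mem f := by
  obtain ⟨A9, A10, ho⟩ := h.own
  have ha := h.arena
  -- a block the configuration reads differs from a block allocated between the snapshots
  have hne : ∀ B C', ConfigOK.Reads mem f B → Since A9 A10 C' → B ≠ C' := by
    intro B C' hR hC' e
    cases ho.reads hR with
    | inl h9 =>
      rw [e] at h9
      exact hC'.2 h9
    | inr hs =>
      rw [e] at hs
      exact hs.2 hC'.1
  refine ⟨?_, ?_, ?_⟩
  · -- a configuration block and `*f`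
    intro B hR
    have hin := arena_inside ha (ho.reads_arena hR)
    simp only [vblock]
    omega
  · -- a configuration block and a sample buffer
    intro B hR C hC
    obtain ⟨C', hC', hbase, hcase⟩ := ho.buf h.env.ok hC
    have hd := arena_disjoint ha (ho.reads_arena hR) (ho.up10 _ hC') (hne B C' hR hC')
    cases hcase with
    | inl e =>
      rw [e]
      exact hd
    | inr h0 =>
      simp only [vblock] at hd ⊢
      omega
  · -- a sample buffer and `*f`
    intro C hC
    obtain ⟨C', hC', hbase, hcase⟩ := ho.buf h.env.ok hC
    have hin := arena_inside ha (ho.up10 _ hC')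
    cases hcase with
    | inl e =>
      rw [e]
      simp only [vblock]
      omega
    | inr h0 =>
      simp only [vblock]
      omega

/-- **"Every owned block is an arena block"** at SD.12: the CONFIG part of `VorbisOK` holds over the arena's OWN block predicate
(`ConfigOK.reads_blk`, the groups' `owns_blk` then give `A.1.Blk B` for every block the invariant reads or owns). -/
theorem Done.config_arena {len f : Nat} {Live : Nat → Prop} {A : Arena × List Obj} {mem : Mem} (h : Done len f Live A mem) :
    ConfigOK A.1.Blk mem f := by
  obtain ⟨A9, A10, ho⟩ := h.own
  have hc := h.vorbis.config
  exact ho.config (fun _ hB => hB) hc.header hc.mode hc.temp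

/-- The premise `hne1` of `Separated.transfer` (stb_vorbis_open_memory, `*f' = p`): a block the configuration reads is not `*f`. -/
theorem Done.reads_ne_obj {len f : Nat} {Live : Nat → Prop} {A : Arena × List Obj} {mem : Mem} (h : Done len f Live A mem)
    (hout : f + Off.sizeof.stb_vorbis ≤ A.1.B ∨ A.1.B + A.1.L ≤ f) {B : Block} (hR : ConfigOK.Reads mem f B) :
    B ≠ objBlock f := by
  intro e
  have hd := (h.separated hout).obj B hR
  rw [e] at hd
  simp only [vblock, voff] at hd
  omega

/-- The premise `hne2` of `Separated.transfer`: a sample buffer is not `*f`. -/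
theorem Done.buf_ne_obj {len f : Nat} {Live : Nat → Prop} {A : Arena × List Obj} {mem : Mem} (h : Done len f Live A mem)
    (hout : f + Off.sizeof.stb_vorbis ≤ A.1.B ∨ A.1.B + A.1.L ≤ f) {C : Block} (hC : SampleBuf (blk len f A) mem f C) :
    C ≠ objBlock f := by
  intro e
  have hd := (h.separated hout).bufobj C hC
  rw [e] at hd
  simp only [vblock, voff] at hd
  omega

/-- **A sample buffer is a block of the arena** (or the degenerate size-0 block of `SampleBuf.finalY`): the form
stb_vorbis_open_memory's point P5 carries. -/
theorem Done.buf_arena {len f : Nat} {Live : Nat → Prop} {A : Arena × List Obj} {mem : Mem} (h : Done len f Live A mem) {C : Block}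
    (hC : SampleBuf (blk len f A) mem f C) : C.size = 0 ∨ A.1.Blk C := by
  obtain ⟨A9, A10, ho⟩ := h.own
  obtain ⟨C', hC', _, hcase⟩ := ho.buf h.env.ok hC
  cases hcase with
  | inl e =>
    right
    rw [e]
    exact ho.up10 _ hC'
  | inr h0 => exact Or.inl h0

/-- **Every block the configuration reads is a block of the arena.** -/
theorem Done.reads_arena {len f : Nat} {Live : Nat → Prop} {A : Arena × List Obj} {mem : Mem} (h : Done len f Live A mem) {B : Block}
    (hR : ConfigOK.Reads mem f B) : A.1.Blk B := by
  obtain ⟨A9, A10, ho⟩ := h.own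
  exact ho.reads_arena hR

end StartDecoder

end Vorbis.Spec
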